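-- pv_equiv track=rewrite | github.com/belse-de/github-actions-tools | github_actions_simulate_matrix.py | matrix_to_jobs
-- ===== SOURCE A (Python) =====
-- import itertools
--
-- def matrix_to_jobs(matrix: dict) -> list[dict]:
--     """
--     Convert a GitHub Actions matrix configuration to a list of job configurations.
--
--     Args:
--         matrix (dict): The matrix configuration as a dictionary.
--
--     Returns:
--         list[dict]: A list of job configurations derived from the matrix.
--     """
--     if not isinstance(matrix, dict):
--         raise ValueError("Matrix must be a dictionary.")
--     if "include" in matrix:
--         raise ValueError("Matrix cannot contain 'include' at this stage. Use a different function to handle includes.")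
--     if "exclude" in matrix:
--         raise ValueError("Matrix cannot contain 'exclude' at this stage. Use a different function to handle excludes.")
--
--     product_tasks = []
--     for key, value in matrix.items():
--         tasks = []
--         if isinstance(value, list):
--             tasks = [(key, item) for item in value]
--         else:
--             tasks = [(key, value)]
--         product_tasks.append(tasks)
--
--     job_list = [dict(job_fields) for job_fields in itertools.product(*product_tasks) if job_fields]
--     return job_list
-- ===== SOURCE B (Python) =====
-- def matrix_to_jobs(matrix: dict) -> list[dict]:
--     if not isinstance(matrix, dict):
--         raise ValueError("Matrix must be a dictionary.")
--     if "include" in matrix: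
--         raise ValueError("Matrix cannot contain 'include' at this stage. Use a different function to handle includes.")
--     if "exclude" in matrix:
--         raise ValueError("Matrix cannot contain 'exclude' at this stage. Use a different function to handle excludes.")
--
--     axes = [(key, value if isinstance(value, list) else [value])
--             for key, value in matrix.items()]
--
--     # Mixed-radix enumeration: there are total = prod(sizes) jobs; job #i picks
--     # index (i // stride) % size on each axis, where stride is the product of
--     # the sizes of all later axes (rightmost axis varies fastest).
--     strides = []
--     total = 1
--     for _, values in reversed(axes):
--         strides.append(total)
--         total *= len(values)
--     strides.reverse()
--
--     job_list = []
--     for i in range(total):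
--         fields = [(key, values[(i // stride) % len(values)])
--                   for (key, values), stride in zip(axes, strides)]
--         if fields:
--             job_list.append(dict(fields))
--     return job_list
-- ===== Notes on version B (the rewrite author's own statement) =====
-- stated objective: alternative
-- what changed: Replaces itertools.product over per-key task lists with closed-form mixed-radix enumeration: total = product of axis sizes, and job #i is decoded arithmetically, picking index (i // stride) % size on each axis where stride is the product of the later axes' sizes.
import Mathlib
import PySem

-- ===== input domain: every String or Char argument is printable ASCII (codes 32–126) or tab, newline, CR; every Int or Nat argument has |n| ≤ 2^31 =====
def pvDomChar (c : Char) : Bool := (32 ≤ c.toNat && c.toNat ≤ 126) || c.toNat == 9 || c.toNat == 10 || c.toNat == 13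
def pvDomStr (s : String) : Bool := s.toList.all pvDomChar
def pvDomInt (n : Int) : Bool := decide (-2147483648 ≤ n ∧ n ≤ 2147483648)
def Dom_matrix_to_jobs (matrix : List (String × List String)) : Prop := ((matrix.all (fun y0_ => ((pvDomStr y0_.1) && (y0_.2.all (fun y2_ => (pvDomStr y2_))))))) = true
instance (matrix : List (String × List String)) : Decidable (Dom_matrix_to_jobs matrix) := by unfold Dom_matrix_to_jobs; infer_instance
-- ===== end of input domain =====

-- B replaces itertools.product over per-key task lists with closed-form mixed-radix
-- enumeration (job #i decoded by integer division) — objective: alternative, same cost.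

-- ===== PORT A =====
-- itertools.product(*lists), ported by hand (exact: rightmost component varies fastest;
-- product of no lists is the single empty tuple)
def pvProduct : List (List (String × String)) → List (List (String × String))
  | [] => [[]]
  | l :: ls => l.flatMap (fun x => (pvProduct ls).map (fun t => x :: t))

-- The three ValueError raises ('include'/'exclude' keys) are excluded by Pre_; under the
-- type convention every matrix value is a list, so the isinstance branch always takes the list arm.
def matrix_to_jobs (matrix : List (String × List String)) : List (List (String × String)) :=
  let product_tasks := matrix.foldl
    (fun acc kv => acc ++ [kv.2.map (fun item => (kv.1, item))]) []
  ((pvProduct product_tasks).filter (fun jf => !jf.isEmpty)).map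
    (fun jf => (PySem.Dict.ofList jf).items)

-- ===== PORT B =====
-- strides/total loop, then for i in range(total) the per-axis pick is
-- values[(i // stride) % len(values)]; whenever the loop body runs, that index is provably
-- in range (0 ≤ i < total forces every axis size and stride positive), so pyGetD with a
-- default is exact here.
def matrix_to_jobs_alt (matrix : List (String × List String)) : List (List (String × String)) :=
  let sp := matrix.reverse.foldl
    (fun (p : List Int × Int) kv => (p.1 ++ [p.2], p.2 * (kv.2.length : Int))) ([], 1)
  let strides := sp.1.reverse
  let total := sp.2
  (PySem.List.pyRange 0 total 1).foldl
    (fun job_list i =>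
      let fields := (matrix.zip strides).map
        (fun x => (x.1.1,
          PySem.List.pyGetD x.1.2
            (PySem.Int.mod (PySem.Int.floordiv i x.2) (x.1.2.length : Int)) ""))
      if !fields.isEmpty then job_list ++ [(PySem.Dict.ofList fields).items] else job_list)
    []

-- ===== PRECONDITION & SPEC =====
-- Pre_ excludes matrices containing an 'include' or 'exclude' key (A raises ValueError there)
-- and association lists with duplicate keys, which do not represent any Python dict input.
def Pre_matrix_to_jobs (matrix : List (String × List String)) : Prop :=
  (matrix.map Prod.fst).Nodup ∧
  "include" ∉ matrix.map Prod.fst ∧ "exclude" ∉ matrix.map Prod.fst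
instance (matrix : List (String × List String)) : Decidable (Pre_matrix_to_jobs matrix) := by
  unfold Pre_matrix_to_jobs; infer_instance

def pvWitness_matrix_to_jobs : (List (String × List String)) :=
  [("os", ["linux", "mac"]), ("py", ["3.10"])]

def Spec_matrix_to_jobs (matrix : List (String × List String)) (out : List (List (String × String))) : Prop := out = matrix_to_jobs_alt matrix
instance (matrix : List (String × List String)) (out : List (List (String × String))) : Decidable (Spec_matrix_to_jobs matrix out) := by unfold Spec_matrix_to_jobs; infer_instance

-- ===== CLAIM (what is proved, stated in full; the proofs are below) =====
def Claim_equal_matrix_to_jobs : Prop := ∀ (matrix : List (String × List String)), Dom_matrix_to_jobs matrix → Pre_matrix_to_jobs matrix → Spec_matrix_to_jobs matrix (matrix_to_jobs matrix)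

-- ===== LEMMAS AND PROOFS =====

-- A's per-key task lists
def pvTasks (matrix : List (String × List String)) : List (List (String × String)) :=
  matrix.map (fun kv => kv.2.map (fun item => (kv.1, item)))

-- total number of jobs (product of the axis sizes)
def pvTot : List (String × List String) → Nat
  | [] => 1
  | kv :: rest => kv.2.length * pvTot rest

-- per-axis strides (product of the later axes' sizes)
def pvStrides : List (String × List String) → List Nat
  | [] => []
  | _ :: rest => pvTot rest :: pvStrides rest

-- remainder-threading decoder of job #i
def pvDecode : List (String × List String) → Nat → List (String × String)
  | [], _ => []
  | kv :: rest, i => (kv.1, kv.2.getD (i / pvTot rest) "") :: pvDecode rest (i % pvTot rest)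

-- B's per-job field list at index i, at the Nat level
def pvZD (m : List (String × List String)) (i : Nat) : List (String × String) :=
  (m.zip (pvStrides m)).map
    (fun x => (x.1.1, x.1.2.getD ((i / x.2) % x.1.2.length) ""))

-- B's strides/total loop computes pvStrides (reversed) and pvTot
theorem pv_strides_fold (m : List (String × List String)) :
    m.reverse.foldl
      (fun (p : List Int × Int) kv => (p.1 ++ [p.2], p.2 * (kv.2.length : Int))) ([], 1)
    = (((pvStrides m).map (fun n => Int.ofNat n)).reverse, (pvTot m : Int)) := by
  rw [List.foldl_reverse]
  induction m with
  | nil => simp [pvStrides, pvTot]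
  | cons kv rest ih =>
    simp only [List.foldr_cons, ih, pvStrides, pvTot]
    refine Prod.ext ?_ ?_
    · simp
    · push_cast; ring

-- the per-axis pick (i // stride) % size depends only on i modulo the total
theorem pv_div_mod_head (i T len : Nat) :
    (i / T) % len = ((i % (len * T)) / T) % len := by
  rcases Nat.eq_zero_or_pos T with hT | hT
  · subst hT; simp
  rcases Nat.eq_zero_or_pos len with hl | hl
  · subst hl; simp
  conv_lhs => rw [← Nat.mod_add_div i (len * T)]
  rw [show len * T * (i / (len * T)) = (len * (i / (len * T))) * T by ring,
    Nat.add_mul_div_right _ _ hT, Nat.add_mul_mod_self_left]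

theorem pv_zd_mod (m : List (String × List String)) (i : Nat) :
    pvZD m i = pvZD m (i % pvTot m) := by
  induction m generalizing i with
  | nil => simp [pvZD]
  | cons kv rest ih =>
    show _ :: _ = _ :: _
    refine congrArg₂ _ ?_ ?_
    · simp only [pvTot]
      rw [pv_div_mod_head i (pvTot rest) kv.2.length]
    · show pvZD rest i = pvZD rest (i % pvTot (kv :: rest))
      rw [ih i, ih (i % pvTot (kv :: rest))]
      congr 1
      simp only [pvTot]
      exact (Nat.mod_mod_of_dvd i (dvd_mul_left (pvTot rest) kv.2.length)).symm

-- below the total, B's stride formula agrees with the remainder-threading decoder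
theorem pv_zd_decode (m : List (String × List String)) (i : Nat) (h : i < pvTot m) :
    pvZD m i = pvDecode m i := by
  induction m generalizing i with
  | nil => simp [pvZD, pvDecode]
  | cons kv rest ih =>
    simp only [pvTot] at h
    have hT : 0 < pvTot rest := by
      rcases Nat.eq_zero_or_pos (pvTot rest) with h0 | h0
      · rw [h0] at h; omega
      · exact h0
    have hlen : i / pvTot rest < kv.2.length :=
      (Nat.div_lt_iff_lt_mul hT).mpr h
    show _ :: _ = _ :: _
    refine congrArg₂ _ ?_ ?_
    · show (kv.1, kv.2.getD (i / pvTot rest % kv.2.length) "") = _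
      rw [Nat.mod_eq_of_lt hlen]
    · show pvZD rest i = pvDecode rest (i % pvTot rest)
      rw [pv_zd_mod rest i]
      exact ih _ (Nat.mod_lt _ hT)

-- range(a*b) enumerated as quotient/remainder pairs, lexicographically
theorem pv_range_mul {α : Type} (a b : Nat) (f : Nat → α) :
    (List.range (a * b)).map f
      = (List.range a).flatMap (fun q => (List.range b).map (fun r => f (q * b + r))) := by
  induction a with
  | zero => simp
  | succ a ih =>
    rw [Nat.succ_mul, List.range_add, List.map_append, ih, List.range_succ,
      List.flatMap_append]
    simp [List.map_map, Function.comp]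

-- flatMap over a list as flatMap over its index range
theorem pv_flatMap_range {α β : Type} (l : List α) (d : α) (g : α → List β) :
    l.flatMap g = (List.range l.length).flatMap (fun q => g (l.getD q d)) := by
  induction l with
  | nil => simp
  | cons x xs ih =>
    rw [List.flatMap_cons, List.length_cons, List.range_succ_eq_map, List.flatMap_cons,
      List.flatMap_map]
    simp only [List.getD_cons_zero, List.getD_cons_succ]
    rw [ih]

-- itertools.product of the task lists is the mixed-radix enumeration of range(total)
theorem pv_product_decode (m : List (String × List String)) :
    pvProduct (pvTasks m) = (List.range (pvTot m)).map (pvDecode m) := by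
  induction m with
  | nil => simp [pvTasks, pvProduct, pvTot, pvDecode]
  | cons kv rest ih =>
    show (kv.2.map (fun item => (kv.1, item))).flatMap
        (fun x => (pvProduct (pvTasks rest)).map (fun t => x :: t)) = _
    rw [ih, pv_flatMap_range _ ("", "") _, List.length_map]
    show _ = (List.range (kv.2.length * pvTot rest)).map (pvDecode (kv :: rest))
    rw [pv_range_mul]
    refine List.flatMap_congr ?_
    intro q hq
    rw [List.mem_range] at hq
    rw [List.map_map]
    refine List.map_congr_left ?_
    intro r hr
    rw [List.mem_range] at hr
    have hT : 0 < pvTot rest := by omega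
    have hdiv : (q * pvTot rest + r) / pvTot rest = q := by
      rw [Nat.add_comm, Nat.add_mul_div_right _ _ hT, Nat.div_eq_of_lt hr, Nat.zero_add]
    have hmod : (q * pvTot rest + r) % pvTot rest = r := by
      rw [Nat.add_comm, Nat.add_mul_mod_self_right, Nat.mod_eq_of_lt hr]
    show (kv.2.map (fun item => (kv.1, item))).getD q ("", "") :: pvDecode rest r
        = pvDecode (kv :: rest) (q * pvTot rest + r)
    show _ = (kv.1, kv.2.getD ((q * pvTot rest + r) / pvTot rest) "")
        :: pvDecode rest ((q * pvTot rest + r) % pvTot rest)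
    rw [hdiv, hmod, List.getD_eq_getElem _ _ (by simpa using hq),
      List.getD_eq_getElem _ _ hq, List.getElem_map]

theorem pv_main (matrix : List (String × List String)) :
    matrix_to_jobs matrix = matrix_to_jobs_alt matrix := by
  unfold matrix_to_jobs matrix_to_jobs_alt
  rw [PySem.List.foldl_append_singleton_eq_map]
  simp only [List.nil_append, pv_strides_fold, List.reverse_reverse]
  rw [show matrix.map (fun kv => kv.2.map (fun item => (kv.1, item))) = pvTasks matrix from rfl]
  rw [pv_product_decode, List.filter_map, List.map_map]
  rw [PySem.List.pyRange_zero_natCast, List.foldl_map]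
  have hbody : ∀ (acc : List (List (String × String))) (k : Nat),
      (fun job_list i =>
        let fields := (matrix.zip ((pvStrides matrix).map (fun n => Int.ofNat n))).map
          (fun x => (x.1.1,
            PySem.List.pyGetD x.1.2
              (PySem.Int.mod (PySem.Int.floordiv i x.2) (x.1.2.length : Int)) ""))
        if !fields.isEmpty then acc ++ [(PySem.Dict.ofList fields).items] else acc) acc (k : Int)
      = (if !(pvZD matrix k).isEmpty then acc ++ [(PySem.Dict.ofList (pvZD matrix k)).items] else acc) := by
    intro acc k
    have hf : (matrix.zip ((pvStrides matrix).map (fun n => Int.ofNat n))).map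
          (fun x => (x.1.1,
            PySem.List.pyGetD x.1.2
              (PySem.Int.mod (PySem.Int.floordiv (k : Int) x.2) (x.1.2.length : Int)) ""))
        = pvZD matrix k := by
      rw [List.zip_map_right, List.map_map]
      refine List.map_congr_left ?_
      intro x _
      obtain ⟨⟨ks, vs⟩, st⟩ := x
      simp only [Function.comp_apply, Prod.map, id_eq, Int.ofNat_eq_natCast,
        PySem.Int.floordiv_natCast, PySem.Int.mod_natCast, PySem.List.pyGetD_natCast]
    simp only [hf]
  rw [List.foldl_ext _ _ _ (fun acc k _ => hbody acc k)]
  rw [PySem.List.foldl_append_if (fun k => !(pvZD matrix k).isEmpty)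
    (fun k => (PySem.Dict.ofList (pvZD matrix k)).items)]
  rw [List.nil_append]
  have hfil : ∀ k ∈ List.range (pvTot matrix),
      (!(pvZD matrix k).isEmpty) = ((fun jf => !jf.isEmpty) ∘ pvDecode matrix) k :=
    fun k hk => by
      simp only [Function.comp_apply, pv_zd_decode matrix k (List.mem_range.mp hk)]
  rw [List.filter_congr hfil]
  refine (List.map_congr_left ?_).symm
  intro k hk
  have hkT : k < pvTot matrix := List.mem_range.mp (List.mem_of_mem_filter hk)
  simp only [Function.comp_apply, pv_zd_decode matrix k hkT]

-- ===== VERDICT (by name: the statement is the Claim_ definition above) =====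
theorem matrix_to_jobs_spec : Claim_equal_matrix_to_jobs := by
  intro matrix _ _
  unfold Spec_matrix_to_jobs
  exact pv_main matrix
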